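-- pv_equiv track=rewrite | github.com/Aasthaengg/IBMdataset | Python_codes/p03072/s114328614.py | actual
-- ===== SOURCE A (Python) =====
-- def actual(n, H):
--     count = 0
--
--     for i in range(len(H)):
--         if i == 0:
--             count += 1
--             continue
--
--         me = H[i]
--         left_towers = H[:i]
--
--         can_see_the_sea = all([h <= me for h in left_towers])
--         count += int(can_see_the_sea)
--
--     return count
-- ===== SOURCE B (Python) =====
-- def actual(n, H):
--     count = 0
--     m = None
--     for h in H:
--         if m is None or h >= m:
--             count += 1
--             m = h
--     return count
-- ===== Notes on version B (the rewrite author's own statement) =====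
-- stated objective: faster
-- what changed: Replaces the quadratic loop that re-scans the whole prefix H[:i] at every index with a single pass that keeps the running maximum and counts elements reaching it.
import Mathlib
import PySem

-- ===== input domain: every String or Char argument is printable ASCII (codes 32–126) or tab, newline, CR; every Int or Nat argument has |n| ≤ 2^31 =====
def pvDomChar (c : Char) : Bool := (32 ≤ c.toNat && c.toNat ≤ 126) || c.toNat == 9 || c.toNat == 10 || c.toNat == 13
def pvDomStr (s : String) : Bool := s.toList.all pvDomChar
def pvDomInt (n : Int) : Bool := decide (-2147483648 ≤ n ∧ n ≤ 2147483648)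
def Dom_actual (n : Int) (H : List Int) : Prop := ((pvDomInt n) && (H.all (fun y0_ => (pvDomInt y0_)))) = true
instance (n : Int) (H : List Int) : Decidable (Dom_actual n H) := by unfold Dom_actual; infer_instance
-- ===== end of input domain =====

-- B replaces A's quadratic prefix re-scan with a single pass tracking the running maximum (asymptotically faster).


-- ===== PORT A =====
-- loop body of A: for i in range(len(H)): if i == 0: count += 1 else: me = H[i]; left = H[:i]; count += int(all(h <= me))
def aStep (H : List Int) (count : Int) (i : Int) : Int :=
  if i = 0 then count + 1
  else
    let me := PySem.List.pyGetD H i 0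
    let left := PySem.List.slice H none (some i)
    count + (if left.all (fun h => decide (h ≤ me)) then 1 else 0)

def actual (n : Int) (H : List Int) : Int :=
  (PySem.List.pyRange 0 (H.length : Int) 1).foldl (aStep H) 0

-- ===== PORT B =====
-- loop body of B: if m is None or h >= m: count += 1; m = h
def bStep (st : Int × Option Int) (h : Int) : Int × Option Int :=
  match st with
  | (c, none) => (c + 1, some h)
  | (c, some m) => if m ≤ h then (c + 1, some h) else (c, some m)

def actual_alt (n : Int) (H : List Int) : Int :=
  (H.foldl bStep (0, none)).1

-- ===== PRECONDITION & SPEC =====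
def Spec_actual (n : Int) (H : List Int) (out : Int) : Prop := out = actual_alt n H
instance (n : Int) (H : List Int) (out : Int) : Decidable (Spec_actual n H out) := by unfold Spec_actual; infer_instance

-- ===== CLAIM (what is proved, stated in full; the proofs are below) =====
def Claim_equal_actual : Prop := ∀ (n : Int) (H : List Int), Dom_actual n H → Spec_actual n H (actual n H)

-- ===== LEMMAS AND PROOFS =====

-- A appended-element step: the new index H.length either is 0 (first tower) or checks the whole old prefix
theorem aStep_last (x c h : Int) (t : List Int) :
    aStep ((h :: t) ++ [x]) c (((h :: t).length : Int)) =
      c + (if (h :: t).all (fun y => decide (y ≤ x)) then 1 else 0) := by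
  have hnz : (((h :: t).length : Int)) ≠ 0 := by simp only [List.length_cons]; push_cast; omega
  have hnn : (0 : Int) ≤ ((h :: t).length : Int) := Int.natCast_nonneg _
  have hget : ((h :: t) ++ [x]).getD (h :: t).length 0 = x := by
    simp [List.getD_eq_getElem?_getD]
  unfold aStep
  rw [if_neg hnz, PySem.List.pyGetD_of_nonneg _ _ hnn, PySem.List.slice_to _ hnn,
      Int.toNat_natCast, List.take_left, hget]

theorem actual_append (n x : Int) (H : List Int) :
    actual n (H ++ [x]) = actual n H + (if H.all (fun h => decide (h ≤ x)) then 1 else 0) := by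
  unfold actual
  have hlen : ((H ++ [x]).length : Int) = (H.length : Int) + 1 := by
    simp
  rw [hlen, PySem.List.pyRange_one_succ_right (by positivity), List.foldl_append]
  have hpre : (PySem.List.pyRange 0 (H.length : Int) 1).foldl (aStep (H ++ [x])) 0
            = (PySem.List.pyRange 0 (H.length : Int) 1).foldl (aStep H) 0 := by
    apply PySem.List.foldl_congr_mem
    intro c i hi
    obtain ⟨h0, hlt⟩ := (PySem.List.mem_pyRange_one).mp hi
    unfold aStep
    rw [PySem.List.pyGetD_of_nonneg _ _ h0, PySem.List.pyGetD_of_nonneg _ _ h0,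
        PySem.List.slice_to _ h0, PySem.List.slice_to _ h0,
        List.take_append_of_le_length (by omega),
        List.getD_append _ _ _ _ (by omega)]
  rw [hpre]
  cases H with
  | nil =>
      simp [aStep, PySem.List.pyRange_one_eq_nil]
  | cons h t =>
      simp only [List.foldl_cons, List.foldl_nil]
      rw [aStep_last]

-- B's second state component after folding over a nonempty prefix is the running maximum
theorem bStep_snd (H : List Int) (c v : Int) :
    H.foldl bStep (c, some v) = ((H.foldl bStep (c, some v)).1, some (H.foldl max v)) := by
  induction H generalizing c v with
  | nil => rfl
  | cons h t ih =>
      simp only [List.foldl_cons, bStep]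
      split_ifs with hle
      · rw [ih]; simp [max_eq_right hle]
      · rw [ih]; simp [max_eq_left (show h ≤ v by omega)]

theorem foldl_max_le_iff (t : List Int) (v x : Int) :
    (t.foldl max v ≤ x) ↔ (v ≤ x ∧ t.all (fun y => decide (y ≤ x))) := by
  induction t generalizing v with
  | nil => simp
  | cons h t ih =>
      simp only [List.foldl_cons, ih, List.all_cons, max_le_iff]
      simp [and_assoc]

theorem actual_alt_cons (n h : Int) (t : List Int) :
    actual_alt n (h :: t) = (t.foldl bStep (1, some h)).1 := by
  simp [actual_alt, bStep]

theorem actual_eq_alt (n : Int) (H : List Int) : actual n H = actual_alt n H := by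
  induction H using List.reverseRecOn with
  | nil => rfl
  | append_singleton H x ih =>
      rw [actual_append, ih]
      cases H with
      | nil => rfl
      | cons h t =>
          rw [actual_alt_cons]
          show _ = ((h :: (t ++ [x])).foldl bStep (0, none)).1
          have e1 : ((h :: (t ++ [x])).foldl bStep (0, none)) = (t ++ [x]).foldl bStep (1, some h) := by
            simp [bStep]
          rw [e1, List.foldl_append, bStep_snd t 1 h]
          simp only [List.foldl_cons, List.foldl_nil, List.all_cons, bStep]
          by_cases hc : t.foldl max h ≤ x
          · have := (foldl_max_le_iff t h x).mp hc
            simp [hc, this.1, this.2]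
          · have hno : ¬ (h ≤ x ∧ t.all (fun y => decide (y ≤ x)) = true) :=
              fun hh => hc ((foldl_max_le_iff t h x).mpr ⟨hh.1, hh.2⟩)
            by_cases h1 : h ≤ x
            · have h2 : ¬ t.all (fun y => decide (y ≤ x)) = true := fun ht => hno ⟨h1, ht⟩
              simp [hc, h1, h2]
            · simp [hc, h1]

-- ===== VERDICT (by name: the statement is the Claim_ definition above) =====
theorem actual_spec : Claim_equal_actual := by
  intro n H _
  exact actual_eq_alt n H
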